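-- pv_equiv track=rewrite | github.com/LZUCSWang/code | ELSE/PYTHON/ALG/study/排队小球.py | check
-- ===== SOURCE A (Python) =====
-- def check(cnt):
--     temp = 1
--     lasttemp = 0
--     cnt = cnt+[0]
--     for i in range(len(cnt)-1):
--         if cnt[i] == cnt[i+1]:
--             temp += 1
--         else:
--             if lasttemp >= temp:
--                 return 0
--             lasttemp = temp
--             temp = 1
--     return 1
-- ===== SOURCE B (Python) =====
-- def check(cnt):
--     xs = cnt + [0]
--     # indices where a run ends, with a virtual boundary before index 0
--     bounds = [-1] + [i for i, (a, b) in enumerate(zip(xs, xs[1:])) if a != b]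
--     # lengths of all runs except the last (never-flushed) one
--     runs = [b - a for a, b in zip(bounds, bounds[1:])]
--     return 1 if all(a < b for a, b in zip(runs, runs[1:])) else 0
-- ===== Notes on version B (the rewrite author's own statement) =====
-- stated objective: idiomatic
-- what changed: A's single fused loop with temp/lasttemp state and an early return is replaced by a two-phase pipeline: first collect run-boundary indices (comprehension over enumerate(zip(xs, xs[1:]))), turn adjacent boundary differences into run lengths, then check all consecutive run-length pairs strictly increase with all().
import Mathlib
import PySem

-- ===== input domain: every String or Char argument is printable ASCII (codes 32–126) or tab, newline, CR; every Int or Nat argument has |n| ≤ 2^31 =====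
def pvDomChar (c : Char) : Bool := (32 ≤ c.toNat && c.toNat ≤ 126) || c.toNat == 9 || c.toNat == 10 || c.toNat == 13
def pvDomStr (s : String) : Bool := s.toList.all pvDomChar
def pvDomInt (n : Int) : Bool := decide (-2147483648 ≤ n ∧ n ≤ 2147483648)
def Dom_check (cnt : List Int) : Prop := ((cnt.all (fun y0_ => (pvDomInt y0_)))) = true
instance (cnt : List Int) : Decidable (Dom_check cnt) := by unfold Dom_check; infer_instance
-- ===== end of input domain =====

-- B restates A's fused single loop as a two-phase pipeline (run-boundary indices -> run lengths -> adjacent strict-increase check); objective: more idiomatic decomposition, same cost.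

-- ===== PORT A =====
-- A walks consecutive positions i with cnt[i] vs cnt[i+1]; transliterated as structural
-- recursion on the list, carrying the same state (temp, lasttemp), with A's early return 0.
def checkAux : Int → Int → List Int → Int
  | temp, lasttemp, a :: b :: rest =>
      if a = b then checkAux (temp + 1) lasttemp (b :: rest)
      else if lasttemp ≥ temp then 0
      else checkAux 1 temp (b :: rest)
  | _, _, _ => 1

def check (cnt : List Int) : Int := checkAux 1 0 (cnt ++ [0])

-- ===== PORT B =====
-- port of the comprehension '[i for i,(a,b) in enumerate(zip(xs, xs[1:])) if a != b]'
-- (counter-carrying filter over the pair list; xs[1:] is the tail)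
def boundsAux : Int → List (Int × Int) → List Int
  | _, [] => []
  | i, (a, b) :: ps => if a ≠ b then i :: boundsAux (i + 1) ps else boundsAux (i + 1) ps

def check_alt (cnt : List Int) : Int :=
  let xs := cnt ++ [0]
  let bounds := (-1 : Int) :: boundsAux 0 (xs.zip xs.tail)
  let runs := (bounds.zip bounds.tail).map (fun p => p.2 - p.1)
  if (runs.zip runs.tail).all (fun p => decide (p.1 < p.2)) then 1 else 0

-- ===== PRECONDITION & SPEC =====
def Spec_check (cnt : List Int) (out : Int) : Prop := out = check_alt cnt
instance (cnt : List Int) (out : Int) : Decidable (Spec_check cnt out) := by unfold Spec_check; infer_instance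

-- ===== CLAIM (what is proved, stated in full; the proofs are below) =====
def Claim_equal_check : Prop := ∀ (cnt : List Int), Dom_check cnt → Spec_check cnt (check cnt)

-- ===== LEMMAS AND PROOFS =====

-- A's loop rephrased over the pair list (proof-only reference versions)
def checkP : Int → Int → List (Int × Int) → Int
  | _, _, [] => 1
  | temp, lasttemp, (a, b) :: ps =>
      if a = b then checkP (temp + 1) lasttemp ps
      else if lasttemp ≥ temp then 0
      else checkP 1 temp ps

def runsP : Int → List (Int × Int) → List Int
  | _, [] => []
  | n, (a, b) :: ps => if a = b then runsP (n + 1) ps else n :: runsP 1 ps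

def judge : Int → List Int → Int
  | _, [] => 1
  | last, r :: rs => if last ≥ r then 0 else judge r rs

def chain : Int → List Int → Bool
  | _, [] => true
  | last, r :: rs => decide (last < r) && chain r rs

lemma checkAux_eq_checkP (xs : List Int) : ∀ temp last,
    checkAux temp last xs = checkP temp last (xs.zip xs.tail) := by
  induction xs with
  | nil => intro t l; rfl
  | cons a rest ih =>
    intro t l
    cases rest with
    | nil => rfl
    | cons b r =>
      simp only [checkAux, List.tail_cons, List.zip_cons_cons, checkP]
      split_ifs <;> simp [ih]

lemma checkP_eq_judge (ps : List (Int × Int)) : ∀ temp last,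
    checkP temp last ps = judge last (runsP temp ps) := by
  induction ps with
  | nil => intro t l; rfl
  | cons p ps ih =>
    intro t l
    obtain ⟨a, b⟩ := p
    by_cases h1 : a = b
    · simp [checkP, runsP, h1, ih]
    · simp only [checkP, runsP, h1, ite_false, judge]
      split_ifs with h2
      · rfl
      · exact ih 1 t

lemma judge_eq_chain (rs : List Int) : ∀ last, judge last rs = if chain last rs then 1 else 0 := by
  induction rs with
  | nil => intro l; rfl
  | cons r rs ih =>
    intro l
    simp only [judge, chain]
    by_cases h : l ≥ r
    · simp [h, show ¬ l < r by omega]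
    · simp [h, show l < r by omega, ih]

lemma runsP_pos (ps : List (Int × Int)) : ∀ n, 1 ≤ n → ∀ r ∈ runsP n ps, 1 ≤ r := by
  induction ps with
  | nil => intro n _ r hr; simp [runsP] at hr
  | cons p ps ih =>
    intro n hn r hr
    obtain ⟨a, b⟩ := p
    simp only [runsP] at hr
    split_ifs at hr with h
    · exact ih _ (by omega) _ hr
    · rcases List.mem_cons.1 hr with h' | h'
      · omega
      · exact ih 1 le_rfl _ h'

lemma allLt_cons_eq_chain (rs : List Int) : ∀ r,
    (((r :: rs).zip rs).all (fun p => decide (p.1 < p.2))) = chain r rs := by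
  induction rs with
  | nil => intro r; rfl
  | cons x rs ih => intro r; simp [chain, ih]

lemma boundsAux_diffs (ps : List (Int × Int)) : ∀ k prev,
    ((prev :: boundsAux k ps).zip (boundsAux k ps)).map (fun p => p.2 - p.1)
      = runsP (k - prev) ps := by
  induction ps with
  | nil => intro k prev; rfl
  | cons p ps ih =>
    intro k prev
    obtain ⟨a, b⟩ := p
    by_cases h : a = b
    · have h2 := ih (k + 1) prev
      rw [show k + 1 - prev = k - prev + 1 by ring] at h2
      simp [boundsAux, runsP, h, h2]
    · have h1 := ih (k + 1) k
      rw [show k + 1 - k = (1 : Int) by ring] at h1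
      simp [boundsAux, runsP, h, List.zip_cons_cons, h1]

lemma judge_zero_eq_allLt (rs : List Int) (hpos : ∀ r ∈ rs, 1 ≤ r) :
    judge 0 rs = if ((rs.zip rs.tail).all (fun p => decide (p.1 < p.2))) then 1 else 0 := by
  cases rs with
  | nil => rfl
  | cons r rs =>
    have hr : 1 ≤ r := hpos r (List.mem_cons_self ..)
    simp only [judge, show ¬ ((0 : Int) ≥ r) by omega, if_false, List.tail_cons]
    rw [judge_eq_chain]
    simp [allLt_cons_eq_chain]

-- ===== VERDICT (by name: the statement is the Claim_ definition above) =====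
theorem check_spec : Claim_equal_check := by
  intro cnt _
  unfold Spec_check check check_alt
  simp only [List.tail_cons]
  rw [checkAux_eq_checkP, checkP_eq_judge]
  have hB := boundsAux_diffs ((cnt ++ [0]).zip (cnt ++ [0]).tail) 0 (-1)
  rw [show (0 : Int) - (-1) = 1 by ring] at hB
  simp only [hB]
  exact judge_zero_eq_allLt _ (runsP_pos _ 1 le_rfl)
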